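-- pv_equiv track=rewrite | github.com/wesley511/ioi-colony | update_staff_index.py | pick_latest_date_day
-- ===== SOURCE A (Python) =====
-- def pick_latest_date_day(master_rec: dict, signals: list[dict]) -> tuple[str, str]:
--     latest_date = master_rec.get("last_seen_date", "n/a")
--     latest_day = "n/a"
--
--     for sig in signals:
--         if sig.get("date"):
--             latest_date = sig["date"]
--         if sig.get("day"):
--             latest_day = sig["day"]
--
--     return latest_date, latest_day
-- ===== SOURCE B (Python) =====
-- def pick_latest_date_day(master_rec: dict, signals: list[dict]) -> tuple[str, str]:
--     latest_date = None
--     latest_day = None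
--     for sig in reversed(signals):
--         if latest_date is None:
--             d = sig.get("date")
--             if d:
--                 latest_date = d
--         if latest_day is None:
--             y = sig.get("day")
--             if y:
--                 latest_day = y
--         if latest_date is not None and latest_day is not None:
--             break
--     if latest_date is None:
--         latest_date = master_rec.get("last_seen_date", "n/a")
--     if latest_day is None:
--         latest_day = "n/a"
--     return latest_date, latest_day
-- ===== Notes on version B (the rewrite author's own statement) =====
-- stated objective: alternative
-- what changed: B scans the signals in reverse with found-flags (Option state) and breaks as soon as both the last truthy date and day are found, instead of A's forward overwrite of two accumulators over the whole list; the master_rec fallback is applied only when no signal supplied a date.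
import Mathlib
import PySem

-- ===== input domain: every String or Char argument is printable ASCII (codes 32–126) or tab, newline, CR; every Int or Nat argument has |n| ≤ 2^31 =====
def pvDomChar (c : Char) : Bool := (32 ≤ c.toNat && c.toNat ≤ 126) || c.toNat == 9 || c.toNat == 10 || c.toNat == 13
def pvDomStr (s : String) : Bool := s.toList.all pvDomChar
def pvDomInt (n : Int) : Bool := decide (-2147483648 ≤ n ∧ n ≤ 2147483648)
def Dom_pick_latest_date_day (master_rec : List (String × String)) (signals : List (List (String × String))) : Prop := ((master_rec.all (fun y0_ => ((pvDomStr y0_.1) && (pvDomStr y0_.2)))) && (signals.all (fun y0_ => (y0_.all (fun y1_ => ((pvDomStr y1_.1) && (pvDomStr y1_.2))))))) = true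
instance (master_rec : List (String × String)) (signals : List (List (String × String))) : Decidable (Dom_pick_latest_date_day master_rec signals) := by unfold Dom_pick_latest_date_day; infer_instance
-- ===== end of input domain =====

-- B scans the signals in reverse with Option found-state and an early break once both the
-- last truthy date and day are found, instead of A's forward overwrite over the whole list.

-- shared helper: Python dict.get on an association list (first match, none = missing key)
def pvGet? (d : List (String × String)) (k : String) : Option String :=
  match d.find? (fun p => p.1 == k) with
  | some p => some p.2
  | none => none

-- ===== PORT A =====
def pick_latest_date_day (master_rec : List (String × String)) (signals : List (List (String × String))) : String × String :=
  signals.foldl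
    (fun st sig =>
      let st1 :=
        match pvGet? sig "date" with
        | some d => if d ≠ "" then (d, st.2) else st
        | none => st
      match pvGet? sig "day" with
      | some y => if y ≠ "" then (st1.1, y) else st1
      | none => st1)
    ((pvGet? master_rec "last_seen_date").getD "n/a", "n/a")

-- ===== PORT B =====
-- reverse scan with found-state (Option), breaking when both are found
def pick_latest_go : List (List (String × String)) → Option String → Option String → Option String × Option String
  | [], od, oy => (od, oy)
  | sig :: rest, od, oy =>
    let od' :=
      match od with
      | some _ => od
      | none =>
        match pvGet? sig "date" with
        | some d => if d ≠ "" then some d else none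
        | none => none
    let oy' :=
      match oy with
      | some _ => oy
      | none =>
        match pvGet? sig "day" with
        | some y => if y ≠ "" then some y else none
        | none => none
    if od'.isSome && oy'.isSome then (od', oy') else pick_latest_go rest od' oy'

def pick_latest_date_day_alt (master_rec : List (String × String)) (signals : List (List (String × String))) : String × String :=
  let r := pick_latest_go signals.reverse none none
  (r.1.getD ((pvGet? master_rec "last_seen_date").getD "n/a"), r.2.getD "n/a")

-- ===== PRECONDITION & SPEC =====
def Spec_pick_latest_date_day (master_rec : List (String × String)) (signals : List (List (String × String))) (out : String × String) : Prop := out = pick_latest_date_day_alt master_rec signals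
instance (master_rec : List (String × String)) (signals : List (List (String × String))) (out : String × String) : Decidable (Spec_pick_latest_date_day master_rec signals out) := by unfold Spec_pick_latest_date_day; infer_instance

-- ===== CLAIM (what is proved, stated in full; the proofs are below) =====
def Claim_equal_pick_latest_date_day : Prop := ∀ (master_rec : List (String × String)) (signals : List (List (String × String))), Dom_pick_latest_date_day master_rec signals → Spec_pick_latest_date_day master_rec signals (pick_latest_date_day master_rec signals)

-- ===== LEMMAS AND PROOFS =====

-- truthy value of sig.get(k): some v iff the key is present with a non-empty value
def pvTv (k : String) (sig : List (String × String)) : Option String :=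
  match pvGet? sig k with
  | some d => if d ≠ "" then some d else none
  | none => none

-- last truthy value of key k in the list (A's forward overwrite result)
def pvLastv (k : String) : List (List (String × String)) → Option String
  | [] => none
  | sig :: rest => (pvLastv k rest).or (pvTv k sig)

-- first truthy value of key k in the list (B's reverse-scan result)
def pvFirstv (k : String) : List (List (String × String)) → Option String
  | [] => none
  | sig :: rest => (pvTv k sig).or (pvFirstv k rest)

theorem pvOr_of_isSome (a b : Option String) (h : a.isSome = true) : a.or b = a := by
  cases a with
  | some v => rfl
  | none => simp at h

theorem pvOr_getD (a b : Option String) (c : String) :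
    (a.or b).getD c = a.getD (b.getD c) := by cases a <;> rfl

theorem foldlA_eq (sigs : List (List (String × String))) (d y : String) :
    sigs.foldl
      (fun st sig =>
        let st1 :=
          match pvGet? sig "date" with
          | some d => if d ≠ "" then (d, st.2) else st
          | none => st
        match pvGet? sig "day" with
        | some y => if y ≠ "" then (st1.1, y) else st1
        | none => st1)
      (d, y)
    = ((pvLastv "date" sigs).getD d, (pvLastv "day" sigs).getD y) := by
  induction sigs generalizing d y with
  | nil => simp [pvLastv]
  | cons sig rest ih =>
    simp only [List.foldl_cons, pvLastv, pvOr_getD]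
    have hstep :
        (let st1 :=
          match pvGet? sig "date" with
          | some d' => if d' ≠ "" then (d', ((d, y) : String × String).2) else (d, y)
          | none => (d, y)
        match pvGet? sig "day" with
        | some y' => if y' ≠ "" then (st1.1, y') else st1
        | none => st1)
        = (((pvTv "date" sig).getD d, (pvTv "day" sig).getD y) : String × String) := by
      simp only [pvTv]
      cases hd : pvGet? sig "date" <;> cases hy : pvGet? sig "day" <;>
        simp only [] <;> (try split_ifs) <;> first | rfl | simp_all
    rw [hstep, ih]

theorem go_eq (l : List (List (String × String))) (od oy : Option String) :
    pick_latest_go l od oy = (od.or (pvFirstv "date" l), oy.or (pvFirstv "day" l)) := by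
  induction l generalizing od oy with
  | nil => simp [pick_latest_go, pvFirstv]
  | cons sig rest ih =>
    simp only [pick_latest_go, pvFirstv]
    have hod : (match od with
        | some _ => od
        | none =>
          match pvGet? sig "date" with
          | some d => if d ≠ "" then some d else none
          | none => none) = od.or (pvTv "date" sig) := by
      cases od <;> simp [pvTv, Option.or]
    have hoy : (match oy with
        | some _ => oy
        | none =>
          match pvGet? sig "day" with
          | some y => if y ≠ "" then some y else none
          | none => none) = oy.or (pvTv "day" sig) := by
      cases oy <;> simp [pvTv, Option.or]
    rw [hod, hoy]
    split_ifs with h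
    · obtain ⟨h1, h2⟩ := Bool.and_eq_true_iff.mp h
      rw [← Option.or_assoc, ← Option.or_assoc,
        pvOr_of_isSome _ _ h1, pvOr_of_isSome _ _ h2]
    · rw [ih]
      simp [Option.or_assoc]

theorem firstv_append (k : String) (a b : List (List (String × String))) :
    pvFirstv k (a ++ b) = (pvFirstv k a).or (pvFirstv k b) := by
  induction a with
  | nil => simp [pvFirstv]
  | cons sig rest ih => simp [pvFirstv, ih, Option.or_assoc]

theorem firstv_reverse (k : String) (l : List (List (String × String))) :
    pvFirstv k l.reverse = pvLastv k l := by
  induction l with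
  | nil => rfl
  | cons sig rest ih =>
    simp [List.reverse_cons, firstv_append, ih, pvLastv, pvFirstv]

-- ===== VERDICT (by name: the statement is the Claim_ definition above) =====
theorem pick_latest_date_day_spec : Claim_equal_pick_latest_date_day := by
  intro m sigs _
  unfold Spec_pick_latest_date_day pick_latest_date_day pick_latest_date_day_alt
  rw [foldlA_eq, go_eq, firstv_reverse, firstv_reverse]
  simp
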